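-- pv_equiv track=rewrite | github.com/eroge-69/PyToExe | python-files/Traktor_bridge_1.1.py | _get_cue_summary
-- ===== SOURCE A (Python) =====
-- from typing import Dict, List, Optional, Any, Tuple
-- from enum import Enum
--
-- class CueType(Enum):
--     """Cue point types for Traktor/Rekordbox mapping."""
--     GRID, HOT_CUE, FADE_IN, FADE_OUT, LOAD, LOOP = range(6)
--
-- def _get_cue_summary(cue_points: List[Dict]) -> str:
--     """Generate cue point summary for display."""
--     summary = {'hotcues': 0, 'memory': 0, 'loops': 0}
--     for cue in cue_points:
--         if cue.get('type') == CueType.HOT_CUE.value and cue.get('hotcue', -1) > 0: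
--             summary['hotcues'] += 1
--         elif cue.get('type') == CueType.LOAD.value:
--             summary['memory'] += 1
--         elif cue.get('type') == CueType.LOOP.value and cue.get('len', 0) > 0:
--             summary['loops'] += 1
--
--     parts = []
--     if summary['hotcues'] > 0: parts.append(f"H{summary['hotcues']}")
--     if summary['memory'] > 0: parts.append(f"M{summary['memory']}")
--     if summary['loops'] > 0: parts.append(f"L{summary['loops']}")
--     return " ".join(parts) if parts else "-"
-- ===== SOURCE B (Python) =====
-- from typing import Dict, List
-- from enum import Enum
--
-- class CueType(Enum):
--     """Cue point types for Traktor/Rekordbox mapping."""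
--     GRID, HOT_CUE, FADE_IN, FADE_OUT, LOAD, LOOP = range(6)
--
-- def _get_cue_summary(cue_points: List[Dict]) -> str:
--     """Generate cue point summary for display."""
--     # The three type values are mutually exclusive, so three independent
--     # counting passes are exactly equivalent to A's if/elif loop.
--     h = sum(1 for c in cue_points
--             if c.get('type') == CueType.HOT_CUE.value and c.get('hotcue', -1) > 0)
--     m = sum(1 for c in cue_points if c.get('type') == CueType.LOAD.value)
--     l = sum(1 for c in cue_points
--             if c.get('type') == CueType.LOOP.value and c.get('len', 0) > 0)
--     parts = [f"{tag}{n}" for tag, n in (("H", h), ("M", m), ("L", l)) if n > 0]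
--     return " ".join(parts) if parts else "-"
-- ===== Notes on version B (the rewrite author's own statement) =====
-- stated objective: idiomatic
-- what changed: Replaces the single if/elif accumulator loop over a mutable summary dict by three independent sum() generator-expression counts (valid because the three cue-type values are mutually exclusive) and a comprehension that builds the display parts.
import Mathlib
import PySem

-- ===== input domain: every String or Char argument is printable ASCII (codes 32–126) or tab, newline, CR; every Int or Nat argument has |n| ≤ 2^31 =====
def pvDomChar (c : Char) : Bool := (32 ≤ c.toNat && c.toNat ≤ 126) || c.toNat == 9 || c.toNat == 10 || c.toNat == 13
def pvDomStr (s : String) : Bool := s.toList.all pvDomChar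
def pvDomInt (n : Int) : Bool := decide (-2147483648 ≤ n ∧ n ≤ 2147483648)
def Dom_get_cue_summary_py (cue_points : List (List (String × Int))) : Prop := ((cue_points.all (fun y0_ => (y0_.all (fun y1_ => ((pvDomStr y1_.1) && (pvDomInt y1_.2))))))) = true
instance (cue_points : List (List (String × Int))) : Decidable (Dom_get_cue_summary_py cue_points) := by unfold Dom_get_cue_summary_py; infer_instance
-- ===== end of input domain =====

-- B replaces A's single if/elif accumulator loop by three independent counting passes (idiomatic; same cost).

-- ===== PORT A =====
-- A's for-loop over cue_points updating the mutable summary dict {'hotcues','memory','loops'},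
-- ported as structural recursion over the same (hotcues, memory, loops) state.
def aCueLoop : List (List (String × Int)) → (Int × Int × Int) → (Int × Int × Int)
  | [], s => s
  | c :: rest, (h, m, l) =>
    let d := PySem.Dict.mk c
    if d.get? "type" = some 1 ∧ d.getD "hotcue" (-1) > 0 then aCueLoop rest (h + 1, m, l)
    else if d.get? "type" = some 4 then aCueLoop rest (h, m + 1, l)
    else if d.get? "type" = some 5 ∧ d.getD "len" 0 > 0 then aCueLoop rest (h, m, l + 1)
    else aCueLoop rest (h, m, l)

def get_cue_summary_py (cue_points : List (List (String × Int))) : String :=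
  let s := aCueLoop cue_points (0, 0, 0)
  let parts : List String := []
  let parts := if s.1 > 0 then parts ++ ["H" ++ PySem.Int.toStr s.1] else parts
  let parts := if s.2.1 > 0 then parts ++ ["M" ++ PySem.Int.toStr s.2.1] else parts
  let parts := if s.2.2 > 0 then parts ++ ["L" ++ PySem.Int.toStr s.2.2] else parts
  if parts ≠ [] then PySem.Str.join " " parts else "-"

-- ===== PORT B =====
-- Three sum(1 for c in … if …) generator expressions, ported as countP; the parts
-- comprehension over (("H",h),("M",m),("L",l)) ported as filter-then-map.
def get_cue_summary_py_alt (cue_points : List (List (String × Int))) : String :=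
  let h : Int := (cue_points.countP (fun c =>
      ((PySem.Dict.mk c).get? "type" == some 1) && decide ((PySem.Dict.mk c).getD "hotcue" (-1) > 0)) : Nat)
  let m : Int := (cue_points.countP (fun c => (PySem.Dict.mk c).get? "type" == some 4) : Nat)
  let l : Int := (cue_points.countP (fun c =>
      ((PySem.Dict.mk c).get? "type" == some 5) && decide ((PySem.Dict.mk c).getD "len" 0 > 0)) : Nat)
  let parts := ([("H", h), ("M", m), ("L", l)].filter (fun tn => tn.2 > 0)).map
      (fun tn => tn.1 ++ PySem.Int.toStr tn.2)
  if parts ≠ [] then PySem.Str.join " " parts else "-"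

-- ===== PRECONDITION & SPEC =====
def Spec_get_cue_summary_py (cue_points : List (List (String × Int))) (out : String) : Prop := out = get_cue_summary_py_alt cue_points
instance (cue_points : List (List (String × Int))) (out : String) : Decidable (Spec_get_cue_summary_py cue_points out) := by unfold Spec_get_cue_summary_py; infer_instance

-- ===== CLAIM (what is proved, stated in full; the proofs are below) =====
def Claim_equal_get_cue_summary_py : Prop := ∀ (cue_points : List (List (String × Int))), Dom_get_cue_summary_py cue_points → Spec_get_cue_summary_py cue_points (get_cue_summary_py cue_points)

-- ===== LEMMAS AND PROOFS =====

-- A's loop computes exactly B's three counts, shifted by the initial state.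
theorem aCueLoop_eq_counts (cs : List (List (String × Int))) (h m l : Int) :
    aCueLoop cs (h, m, l) =
      (h + (cs.countP (fun c =>
          ((PySem.Dict.mk c).get? "type" == some 1) && decide ((PySem.Dict.mk c).getD "hotcue" (-1) > 0)) : Nat),
       m + (cs.countP (fun c => (PySem.Dict.mk c).get? "type" == some 4) : Nat),
       l + (cs.countP (fun c =>
          ((PySem.Dict.mk c).get? "type" == some 5) && decide ((PySem.Dict.mk c).getD "len" 0 > 0)) : Nat)) := by
  induction cs generalizing h m l with
  | nil => simp [aCueLoop]
  | cons c rest ih =>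
    simp only [aCueLoop, List.countP_cons]
    by_cases h1 : (PySem.Dict.mk c).get? "type" = some 1 ∧ (PySem.Dict.mk c).getD "hotcue" (-1) > 0
    · rw [if_pos h1, ih]
      have e1 : (((PySem.Dict.mk c).get? "type" == some 1) && decide ((PySem.Dict.mk c).getD "hotcue" (-1) > 0)) = true := by
        simp [h1.1, h1.2]
      have e4 : ((PySem.Dict.mk c).get? "type" == some 4) = false := by simp [h1.1]
      have e5 : (((PySem.Dict.mk c).get? "type" == some 5) && decide ((PySem.Dict.mk c).getD "len" 0 > 0)) = false := by
        simp [h1.1]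
      simp only [e1, e4, e5, if_true]
      refine Prod.ext ?_ (Prod.ext ?_ ?_) <;> push_cast <;> ring
    · rw [if_neg h1]
      have e1 : (((PySem.Dict.mk c).get? "type" == some 1) && decide ((PySem.Dict.mk c).getD "hotcue" (-1) > 0)) = false := by
        rcases not_and_or.mp h1 with hx | hx <;> simp [hx]
      by_cases h4 : (PySem.Dict.mk c).get? "type" = some 4
      · rw [if_pos h4, ih]
        have e4 : ((PySem.Dict.mk c).get? "type" == some 4) = true := by simp [h4]
        have e5 : (((PySem.Dict.mk c).get? "type" == some 5) && decide ((PySem.Dict.mk c).getD "len" 0 > 0)) = false := by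
          simp [h4]
        simp only [e1, e4, e5, if_true]
        refine Prod.ext ?_ (Prod.ext ?_ ?_) <;> push_cast <;> ring
      · rw [if_neg h4]
        have e4 : ((PySem.Dict.mk c).get? "type" == some 4) = false := by simp [h4]
        by_cases h5 : (PySem.Dict.mk c).get? "type" = some 5 ∧ (PySem.Dict.mk c).getD "len" 0 > 0
        · rw [if_pos h5, ih]
          have e5 : (((PySem.Dict.mk c).get? "type" == some 5) && decide ((PySem.Dict.mk c).getD "len" 0 > 0)) = true := by
            simp [h5.1, h5.2]
          simp only [e1, e4, e5, if_true]
          refine Prod.ext ?_ (Prod.ext ?_ ?_) <;> push_cast <;> ring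
        · rw [if_neg h5, ih]
          have e5 : (((PySem.Dict.mk c).get? "type" == some 5) && decide ((PySem.Dict.mk c).getD "len" 0 > 0)) = false := by
            rcases not_and_or.mp h5 with hx | hx <;> simp [hx]
          simp only [e1, e4, e5]
          simp

-- ===== VERDICT (by name: the statement is the Claim_ definition above) =====
theorem get_cue_summary_py_spec : Claim_equal_get_cue_summary_py := by
  intro cps _
  unfold Spec_get_cue_summary_py get_cue_summary_py get_cue_summary_py_alt
  rw [aCueLoop_eq_counts]
  simp only [zero_add]
  generalize ((List.countP (fun c =>
      ((PySem.Dict.mk c).get? "type" == some 1) && decide ((PySem.Dict.mk c).getD "hotcue" (-1) > 0)) cps : Nat) : Int) = H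
  generalize ((List.countP (fun c => (PySem.Dict.mk c).get? "type" == some 4) cps : Nat) : Int) = M
  generalize ((List.countP (fun c =>
      ((PySem.Dict.mk c).get? "type" == some 5) && decide ((PySem.Dict.mk c).getD "len" 0 > 0)) cps : Nat) : Int) = L
  simp only [List.filter_cons, List.filter_nil, decide_eq_true_eq]
  split_ifs <;> simp_all
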